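-- pv_equiv track=rewrite | github.com/ThinhTTruong/fractional-cascading | src/algorithms.py | binary_search_naive
-- ===== SOURCE A (Python) =====
-- def binary_search_naive(lst, target):
--     left, right = 0, len(lst) - 1
--
--     while left < right:
--         mid = (left + right) // 2
--
--         if lst[mid] == target:
--             return target
--         elif lst[mid] < target:
--             left = mid + 1
--         else:
--             right = mid
--
--     return lst[right]
-- ===== SOURCE B (Python) =====
-- def binary_search_naive(lst, target):
--     # Divide-and-conquer on sublists: no index bookkeeping at all; each step
--     # keeps the half of the list the answer lives in (same probe sequence as
--     # the index-based search, since (len-1)//2 of the kept slice is the old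
--     # midpoint relative to it).
--     if len(lst) <= 1:
--         return lst[0]
--     mid = (len(lst) - 1) // 2
--     v = lst[mid]
--     if v == target:
--         return target
--     if v < target:
--         return binary_search_naive(lst[mid + 1:], target)
--     return binary_search_naive(lst[:mid + 1], target)
-- ===== Notes on version B (the rewrite author's own statement) =====
-- stated objective: alternative
-- what changed: Replaces the iterative two-index (left/right) while-loop with a divide-and-conquer recursion on list slices: B keeps no indices at all, it recurses on lst[mid+1:] or lst[:mid+1] and bottoms out when one element is left.
import Mathlib
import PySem

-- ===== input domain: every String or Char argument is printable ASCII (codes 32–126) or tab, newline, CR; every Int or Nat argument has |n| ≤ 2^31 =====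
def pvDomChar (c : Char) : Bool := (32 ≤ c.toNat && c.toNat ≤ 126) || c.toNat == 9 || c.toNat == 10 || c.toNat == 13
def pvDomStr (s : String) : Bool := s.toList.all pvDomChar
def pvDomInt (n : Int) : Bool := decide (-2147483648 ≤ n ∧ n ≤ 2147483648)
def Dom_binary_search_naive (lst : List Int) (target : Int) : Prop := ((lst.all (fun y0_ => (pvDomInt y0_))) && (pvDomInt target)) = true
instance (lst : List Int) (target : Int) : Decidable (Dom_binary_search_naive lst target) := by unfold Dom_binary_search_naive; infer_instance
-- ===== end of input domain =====

-- B replaces A's two-index while-loop with a divide-and-conquer recursion on list slices (no indices); return values agree on every nonempty list.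

-- ===== PORT A =====
-- A's while-loop as recursion on the loop state (left, right); the range right-left shrinks
-- every iteration, so fuel = lst.length bounds the iteration count (fuel only makes the loop total).
-- lst[i] is PySem.List.pyGet? (in range on every call reachable under Pre_; .getD 0 totalizes).
def bsLoopA (lst : List Int) (target : Int) : Int → Int → Nat → Int
  | _left, right, 0 => (PySem.List.pyGet? lst right).getD 0
  | left, right, fuel + 1 =>
    if left < right then
      let mid := PySem.Int.floordiv (left + right) 2
      let v := (PySem.List.pyGet? lst mid).getD 0
      if v == target then target
      else if v < target then bsLoopA lst target (mid + 1) right fuel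
      else bsLoopA lst target left mid fuel
    else (PySem.List.pyGet? lst right).getD 0

def binary_search_naive (lst : List Int) (target : Int) : Int :=
  bsLoopA lst target 0 ((lst.length : Int) - 1) lst.length

-- ===== PORT B =====
-- Source B transliterated: recursion on the sublist itself; Python slices lst[mid+1:] / lst[:mid+1]
-- are PySem.List.slice; (len(lst)-1)//2 is PySem.Int.floordiv; lst[0] / lst[mid] are pyGet?
-- (in range whenever the list is nonempty; .getD 0 totalizes).
def binary_search_naive_alt (lst : List Int) (target : Int) : Int :=
  if (lst.length : Int) ≤ 1 then (PySem.List.pyGet? lst 0).getD 0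
  else
    let mid := PySem.Int.floordiv ((lst.length : Int) - 1) 2
    let v := (PySem.List.pyGet? lst mid).getD 0
    if v = target then target
    else if v < target then
      binary_search_naive_alt (PySem.List.slice lst (some (mid + 1)) none) target
    else
      binary_search_naive_alt (PySem.List.slice lst none (some (mid + 1))) target
termination_by lst.length
decreasing_by
  · have hm : mid = ((((lst.length - 1) / 2 : Nat)) : Int) := by
      have : ((lst.length : Int) - 1) = (((lst.length - 1 : Nat)) : Int) := by omega
      simp [mid, this]
    have : (mid + 1) = ((((lst.length - 1) / 2 + 1 : Nat)) : Int) := by rw [hm]; push_cast; ring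
    rw [this, PySem.List.slice_from_natCast]
    simp
    omega
  · have hm : mid = ((((lst.length - 1) / 2 : Nat)) : Int) := by
      have : ((lst.length : Int) - 1) = (((lst.length - 1 : Nat)) : Int) := by omega
      simp [mid, this]
    have : (mid + 1) = ((((lst.length - 1) / 2 + 1 : Nat)) : Int) := by rw [hm]; push_cast; ring
    rw [this, PySem.List.slice_to_natCast]
    simp
    omega

-- ===== PRECONDITION & SPEC =====
-- Pre_ excludes the empty list, on which A raises IndexError (lst[-1] with right = -1); B raises there too.
def Pre_binary_search_naive (lst : List Int) (target : Int) : Prop := lst ≠ []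
instance (lst : List Int) (target : Int) : Decidable (Pre_binary_search_naive lst target) := by unfold Pre_binary_search_naive; infer_instance
def pvWitness_binary_search_naive : List Int × Int := ([1, 3, 5], 3)

def Spec_binary_search_naive (lst : List Int) (target : Int) (out : Int) : Prop := out = binary_search_naive_alt lst target
instance (lst : List Int) (target : Int) (out : Int) : Decidable (Spec_binary_search_naive lst target out) := by unfold Spec_binary_search_naive; infer_instance

-- ===== CLAIM (what is proved, stated in full; the proofs are below) =====
def Claim_equal_binary_search_naive : Prop := ∀ (lst : List Int) (target : Int), Dom_binary_search_naive lst target → Pre_binary_search_naive lst target → Spec_binary_search_naive lst target (binary_search_naive lst target)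

-- ===== LEMMAS AND PROOFS =====
-- Invariant: A's loop on the index range [l, r] computes B's recursion on the sublist lst[l..r].
theorem bsLoopA_eq_alt (lst : List Int) (target : Int) :
    ∀ (fuel : Nat) (l r : Int), 0 ≤ l → l ≤ r → r < lst.length → (r - l).toNat < fuel →
      bsLoopA lst target l r fuel
        = binary_search_naive_alt ((lst.drop l.toNat).take (r - l + 1).toNat) target := by
  intro fuel
  induction fuel with
  | zero => intro l r h0 hlr hrn hf; omega
  | succ f ih =>
    intro l r h0 hlr hrn hf
    have ha : ((l.toNat : Int)) = l := Int.toNat_of_nonneg h0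
    set a := l.toNat with ha_def
    set m := (r - l + 1).toNat with hm_def
    have hmi : ((m : Int)) = r - l + 1 := by omega
    have hsub : ((lst.drop a).take m).length = m := by simp; omega
    by_cases hcase : l < r
    · -- loop body runs: m ≥ 2
      have hm2 : 2 ≤ m := by omega
      set k := (m - 1) / 2 with hk_def
      have hkm : k ≤ m - 2 := by omega
      have hmid : PySem.Int.floordiv (l + r) 2 = ((a + k : Nat) : Int) := by
        rw [PySem.Int.floordiv_eq_ediv_of_pos (by norm_num)]
        omega
      have hidx : a + k < lst.length := by omega
      have hvA : (PySem.List.pyGet? lst (((a + k : Nat) : Int))).getD 0 = lst[a + k] := by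
        rw [PySem.List.pyGet?_natCast, List.getElem?_eq_getElem hidx, Option.getD_some]
      have hmidB : PySem.Int.floordiv ((((lst.drop a).take m).length : Int) - 1) 2 = ((k : Nat) : Int) := by
        rw [hsub, PySem.Int.floordiv_eq_ediv_of_pos (by norm_num)]
        omega
      have hvB : (PySem.List.pyGet? ((lst.drop a).take m) ((k : Nat) : Int)).getD 0 = lst[a + k] := by
        rw [PySem.List.pyGet?_natCast, List.getElem?_take, if_pos (by omega), List.getElem?_drop,
          List.getElem?_eq_getElem hidx, Option.getD_some]
      -- unfold one step of each program
      rw [show bsLoopA lst target l r (f + 1)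
            = if l < r then
                let mid := PySem.Int.floordiv (l + r) 2
                let v := (PySem.List.pyGet? lst mid).getD 0
                if v == target then target
                else if v < target then bsLoopA lst target (mid + 1) r f
                else bsLoopA lst target l mid f
              else (PySem.List.pyGet? lst r).getD 0 from rfl,
          if_pos hcase, binary_search_naive_alt]
      have hB1 : ¬((((lst.drop a).take m).length : Int) ≤ 1) := by rw [hsub]; omega
      rw [if_neg hB1]
      simp only [hmid, hmidB, hvA, hvB, beq_iff_eq]
      by_cases heq : lst[a + k] = target
      · rw [if_pos heq, if_pos heq]
      · rw [if_neg heq, if_neg heq]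
        by_cases hlt : lst[a + k] < target
        · rw [if_pos hlt, if_pos hlt]
          have hstep : ((a + k : Nat) : Int) + 1 = ((a + k + 1 : Nat) : Int) := by push_cast; ring
          have hkk : (((k : Nat)) : Int) + 1 = ((k + 1 : Nat) : Int) := by push_cast; ring
          rw [hstep, hkk, PySem.List.slice_from_natCast,
            ih ((a + k + 1 : Nat) : Int) r (by omega) (by omega) hrn (by omega)]
          have e1 : (((a + k + 1 : Nat) : Int)).toNat = a + k + 1 := by omega
          have e2 : ((r - ((a + k + 1 : Nat) : Int) + 1).toNat) = m - (k + 1) := by omega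
          rw [e1, e2, List.drop_take, List.drop_drop]
          have e3 : a + k + 1 = a + (k + 1) := by omega
          rw [e3]
        · rw [if_neg hlt, if_neg hlt]
          have hkk : (((k : Nat)) : Int) + 1 = ((k + 1 : Nat) : Int) := by push_cast; ring
          rw [hkk, PySem.List.slice_to_natCast, List.take_take,
            ih l ((a + k : Nat) : Int) h0 (by omega) (by omega) (by omega)]
          have e4 : ((((a + k : Nat) : Int)) - l + 1).toNat = k + 1 := by omega
          have emin : min (k + 1) m = k + 1 := by omega
          rw [e4, emin]
    · -- loop exits immediately: l = r, m = 1
      have hm1 : m = 1 := by omega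
      rw [show bsLoopA lst target l r (f + 1)
            = if l < r then
                let mid := PySem.Int.floordiv (l + r) 2
                let v := (PySem.List.pyGet? lst mid).getD 0
                if v == target then target
                else if v < target then bsLoopA lst target (mid + 1) r f
                else bsLoopA lst target l mid f
              else (PySem.List.pyGet? lst r).getD 0 from rfl,
          if_neg hcase, binary_search_naive_alt]
      rw [if_pos (by rw [hsub]; omega)]
      have hr : r = ((a : Nat) : Int) := by omega
      rw [hr, PySem.List.pyGet?_natCast,
        show ((0 : Int)) = ((0 : Nat) : Int) from rfl, PySem.List.pyGet?_natCast,
        List.getElem?_take, if_pos (by omega), List.getElem?_drop]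
      norm_num

-- ===== VERDICT (by name: the statement is the Claim_ definition above) =====
theorem binary_search_naive_spec : Claim_equal_binary_search_naive := by
  intro lst target _ hne
  unfold Spec_binary_search_naive binary_search_naive
  have hlen : 1 ≤ lst.length := by
    cases lst with
    | nil => exact absurd rfl hne
    | cons a t => simp
  have h := bsLoopA_eq_alt lst target lst.length 0 ((lst.length : Int) - 1)
    (by omega) (by omega) (by omega) (by omega)
  rw [h]
  simp
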